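-- pv_equiv track=rewrite | github.com/esenti/advent-of-code-2019 | 10/2.py | calculate_blocked_positions
-- ===== SOURCE A (Python) =====
-- from math import gcd, atan2, degrees
--
-- def calculate_blocked_positions(ox, oy, bx, by, width, height):
--     dx = bx - ox
--     dy = by - oy
--
--     d = gcd(dx, dy)
--     dx = dx // d
--     dy = dy // d
--
--     positions = []
--
--     x = bx + dx
--     y = by + dy
--
--     while x >= 0 and y >= 0 and x < width and y < height:
--         positions.append((x, y))
--         x += dx
--         y += dy
--
--     return positions
-- ===== SOURCE B (Python) =====
-- from math import gcd
--
--
-- def _axis_steps(b, d, size):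
--     # Max number of steps i >= 1 with 0 <= b + i*d < size; None means unbounded.
--     if d == 0:
--         return None if 0 <= b < size else 0
--     if d > 0:
--         return 0 if b + d < 0 else max((size - 1 - b) // d, 0)
--     return 0 if b + d >= size else max(b // (-d), 0)
--
--
-- def calculate_blocked_positions(ox, oy, bx, by, width, height):
--     dx = bx - ox
--     dy = by - oy
--     g = gcd(dx, dy)
--     dx //= g
--     dy //= g
--     limits = [s for s in (_axis_steps(bx, dx, width), _axis_steps(by, dy, height))
--               if s is not None]
--     k = min(limits)
--     return [(bx + i * dx, by + i * dy) for i in range(1, k + 1)]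
-- ===== Notes on version B (the rewrite author's own statement) =====
-- stated objective: alternative
-- what changed: Replaces A's step-and-test while loop with a closed-form per-axis floor-division bound on the number of in-bounds steps, then generates the positions in a single range comprehension.
import Mathlib
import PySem

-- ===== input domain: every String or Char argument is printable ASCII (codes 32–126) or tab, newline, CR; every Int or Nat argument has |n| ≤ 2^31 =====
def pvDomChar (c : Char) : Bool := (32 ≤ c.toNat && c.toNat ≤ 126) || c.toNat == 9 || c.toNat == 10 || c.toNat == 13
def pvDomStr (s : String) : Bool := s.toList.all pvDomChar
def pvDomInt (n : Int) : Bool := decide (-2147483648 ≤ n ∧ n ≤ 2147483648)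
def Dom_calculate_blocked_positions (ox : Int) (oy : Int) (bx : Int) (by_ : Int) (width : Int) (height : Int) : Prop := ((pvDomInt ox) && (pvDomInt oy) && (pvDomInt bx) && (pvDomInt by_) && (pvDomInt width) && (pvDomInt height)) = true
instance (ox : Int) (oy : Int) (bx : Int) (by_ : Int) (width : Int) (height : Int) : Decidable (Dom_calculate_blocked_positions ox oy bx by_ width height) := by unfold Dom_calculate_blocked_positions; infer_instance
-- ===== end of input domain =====

-- B replaces A's step-and-test while loop by a closed-form step count per axis (floor divisions)
-- plus a single range comprehension; objective: alternative decomposition (same output list, so same asymptotic cost).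

-- ===== PORT A =====
-- A's while loop: fuel-bounded structural recursion over the same state (x, y, positions).
-- The fuel (width.toNat + height.toNat + 1) is a totalization guard only: inside Pre_ the loop
-- runs strictly fewer steps (proved below), so the port computes exactly what A's loop computes.
def cbpLoop (dx dy width height : Int) : Nat → Int → Int → List (Int × Int) → List (Int × Int)
  | 0, _, _, acc => acc
  | f + 1, x, y, acc =>
    if 0 ≤ x ∧ 0 ≤ y ∧ x < width ∧ y < height then
      cbpLoop dx dy width height f (x + dx) (y + dy) (acc ++ [(x, y)])
    else acc

def calculate_blocked_positions (ox : Int) (oy : Int) (bx : Int) (by_ : Int) (width : Int) (height : Int) : List (Int × Int) :=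
  let dx := bx - ox
  let dy := by_ - oy
  let d : Int := (Int.gcd dx dy : Int)   -- math.gcd: exact, nonnegative gcd
  let dx := PySem.Int.floordiv dx d
  let dy := PySem.Int.floordiv dy d
  cbpLoop dx dy width height (width.toNat + height.toNat + 1) (bx + dx) (by_ + dy) []

-- ===== PORT B =====
-- _axis_steps from Source B: max number of steps i ≥ 1 with 0 ≤ b + i*d < size; none = unbounded.
def axisSteps (b d size : Int) : Option Int :=
  if d = 0 then (if 0 ≤ b ∧ b < size then none else some 0)
  else if 0 < d then
    (if b + d < 0 then some 0 else some (max (PySem.Int.floordiv (size - 1 - b) d) 0))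
  else
    (if size ≤ b + d then some 0 else some (max (PySem.Int.floordiv b (-d)) 0))

def calculate_blocked_positions_alt (ox : Int) (oy : Int) (bx : Int) (by_ : Int) (width : Int) (height : Int) : List (Int × Int) :=
  let dx := bx - ox
  let dy := by_ - oy
  let g : Int := (Int.gcd dx dy : Int)   -- math.gcd: exact, nonnegative gcd
  let dx := PySem.Int.floordiv dx g
  let dy := PySem.Int.floordiv dy g
  let limits := List.filterMap id [axisSteps bx dx width, axisSteps by_ dy height]
  -- Python's min(limits); .getD 0 is a totalization default, reached only outside Pre_
  let k := (PySem.List.min? limits (fun x => x)).getD 0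
  (PySem.List.pyRange 1 (k + 1) 1).map (fun i => (bx + i * dx, by_ + i * dy))

-- ===== PRECONDITION & SPEC =====
-- Pre_ excludes only (bx, by) = (ox, oy): there gcd(0, 0) = 0 and A (and B) raise ZeroDivisionError.
def Pre_calculate_blocked_positions (ox : Int) (oy : Int) (bx : Int) (by_ : Int) (width : Int) (height : Int) : Prop := ¬ (bx = ox ∧ by_ = oy)
instance (ox : Int) (oy : Int) (bx : Int) (by_ : Int) (width : Int) (height : Int) : Decidable (Pre_calculate_blocked_positions ox oy bx by_ width height) := by unfold Pre_calculate_blocked_positions; infer_instance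
def pvWitness_calculate_blocked_positions : Int × Int × Int × Int × Int × Int := (0, 0, 2, 2, 10, 10)
def Spec_calculate_blocked_positions (ox : Int) (oy : Int) (bx : Int) (by_ : Int) (width : Int) (height : Int) (out : List (Int × Int)) : Prop := out = calculate_blocked_positions_alt ox oy bx by_ width height
instance (ox : Int) (oy : Int) (bx : Int) (by_ : Int) (width : Int) (height : Int) (out : List (Int × Int)) : Decidable (Spec_calculate_blocked_positions ox oy bx by_ width height out) := by unfold Spec_calculate_blocked_positions; infer_instance

-- ===== CLAIM (what is proved, stated in full; the proofs are below) =====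
def Claim_equal_calculate_blocked_positions : Prop := ∀ (ox : Int) (oy : Int) (bx : Int) (by_ : Int) (width : Int) (height : Int), Dom_calculate_blocked_positions ox oy bx by_ width height → Pre_calculate_blocked_positions ox oy bx by_ width height → Spec_calculate_blocked_positions ox oy bx by_ width height (calculate_blocked_positions ox oy bx by_ width height)

-- ===== LEMMAS AND PROOFS =====

-- The loop from (x, y) stepping by (dx, dy): if the in-bounds test succeeds for the first m
-- offsets and fails at offset m, and the fuel exceeds m, the loop appends exactly those m points.
lemma cbpLoop_eq (dx dy width height : Int) (m : Nat) :
    ∀ (f : Nat) (x y : Int) (acc : List (Int × Int)), m < f →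
    (∀ j : Nat, j < m → 0 ≤ x + j * dx ∧ 0 ≤ y + j * dy ∧ x + j * dx < width ∧ y + j * dy < height) →
    ¬ (0 ≤ x + m * dx ∧ 0 ≤ y + m * dy ∧ x + m * dx < width ∧ y + m * dy < height) →
    cbpLoop dx dy width height f x y acc =
      acc ++ (List.range m).map (fun (j : Nat) => (x + (j : Int) * dx, y + (j : Int) * dy)) := by
  induction m with
  | zero =>
    intro f x y acc hf hok hbad
    match f, hf with
    | f + 1, _ =>
      simp only [cbpLoop]
      rw [if_neg (by simpa using hbad)]
      simp
  | succ m ih =>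
    intro f x y acc hf hok hbad
    match f, hf with
    | f + 1, hf =>
      simp only [cbpLoop]
      rw [if_pos (by simpa using hok 0 (Nat.succ_pos m))]
      rw [ih f (x + dx) (y + dy) (acc ++ [(x, y)]) (by omega)
          (fun j hj => by
            have := hok (j + 1) (by omega)
            push_cast at this ⊢
            constructor; · linarith [this.1]
            constructor; · linarith [this.2.1]
            constructor; · linarith [this.2.2.1]
            · linarith [this.2.2.2])
          (by
            intro hc
            apply hbad
            push_cast at hc ⊢
            constructor; · linarith [hc.1]
            constructor; · linarith [hc.2.1]
            constructor; · linarith [hc.2.2.1]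
            · linarith [hc.2.2.2])]
      rw [List.range_succ_eq_map]
      simp only [List.map_cons, List.map_map, List.append_assoc, List.cons_append,
        List.nil_append, Nat.cast_zero, zero_mul, add_zero]
      congr 2
      apply List.map_congr_left
      intro j _
      simp only [Function.comp_apply, Nat.succ_eq_add_one]
      push_cast
      refine Prod.ext ?_ ?_ <;> simp <;> ring

-- axisSteps = some kx: every step count 1 ≤ i ≤ kx keeps the axis in bounds.
lemma axisSteps_ok (b d size i kx : Int) (h1 : 1 ≤ i) (hs : axisSteps b d size = some kx)
    (hik : i ≤ kx) : 0 ≤ b + i * d ∧ b + i * d < size := by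
  unfold axisSteps at hs
  by_cases h0 : d = 0
  · rw [if_pos h0] at hs
    by_cases hin : 0 ≤ b ∧ b < size
    · rw [if_pos hin] at hs; exact absurd hs (by simp)
    · rw [if_neg hin] at hs
      have hk := Option.some.inj hs; omega
  · rw [if_neg h0] at hs
    by_cases hp : 0 < d
    · rw [if_pos hp] at hs
      by_cases hneg : b + d < 0
      · rw [if_pos hneg] at hs
        have hk := Option.some.inj hs; omega
      · rw [if_neg hneg] at hs
        have hk := Option.some.inj hs
        have hfd : i ≤ PySem.Int.floordiv (size - 1 - b) d := by omega
        have hub : i * d ≤ size - 1 - b := (PySem.Int.le_floordiv_iff_mul_le hp).mp hfd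
        have hlow : 0 ≤ b + i * d := by nlinarith
        exact ⟨hlow, by omega⟩
    · rw [if_neg hp] at hs
      by_cases hup : size ≤ b + d
      · rw [if_pos hup] at hs
        have hk := Option.some.inj hs; omega
      · rw [if_neg hup] at hs
        have hk := Option.some.inj hs
        have hdpos : 0 < -d := by omega
        have hfd : i ≤ PySem.Int.floordiv b (-d) := by omega
        have hlb : i * (-d) ≤ b := (PySem.Int.le_floordiv_iff_mul_le hdpos).mp hfd
        constructor
        · nlinarith
        · nlinarith

-- axisSteps = none: the axis is in bounds for every step count (d = 0, b in range).
lemma axisSteps_none (b d size i : Int) (hs : axisSteps b d size = none) :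
    0 ≤ b + i * d ∧ b + i * d < size := by
  unfold axisSteps at hs
  by_cases h0 : d = 0
  · rw [if_pos h0] at hs
    by_cases hin : 0 ≤ b ∧ b < size
    · subst h0; simpa using hin
    · rw [if_neg hin] at hs; exact absurd hs (by simp)
  · rw [if_neg h0] at hs
    by_cases hp : 0 < d
    · rw [if_pos hp] at hs
      by_cases hneg : b + d < 0
      · rw [if_pos hneg] at hs; exact absurd hs (by simp)
      · rw [if_neg hneg] at hs; exact absurd hs (by simp)
    · rw [if_neg hp] at hs
      by_cases hup : size ≤ b + d
      · rw [if_pos hup] at hs; exact absurd hs (by simp)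
      · rw [if_neg hup] at hs; exact absurd hs (by simp)

-- axisSteps = some kx: step count kx + 1 leaves the axis bounds.
lemma axisSteps_bad (b d size kx : Int) (hs : axisSteps b d size = some kx) :
    ¬ (0 ≤ b + (kx + 1) * d ∧ b + (kx + 1) * d < size) := by
  unfold axisSteps at hs
  by_cases h0 : d = 0
  · rw [if_pos h0] at hs
    by_cases hin : 0 ≤ b ∧ b < size
    · rw [if_pos hin] at hs; exact absurd hs (by simp)
    · rw [if_neg hin] at hs
      have hk := Option.some.inj hs
      subst h0
      intro hc
      exact hin (by constructor <;> omega)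
  · rw [if_neg h0] at hs
    by_cases hp : 0 < d
    · rw [if_pos hp] at hs
      by_cases hneg : b + d < 0
      · rw [if_pos hneg] at hs
        have hk := Option.some.inj hs
        intro hc; nlinarith [hc.1]
      · rw [if_neg hneg] at hs
        have hk := Option.some.inj hs
        have hge : PySem.Int.floordiv (size - 1 - b) d ≤ kx := by omega
        have h2 : ¬ (kx + 1 ≤ PySem.Int.floordiv (size - 1 - b) d) := by omega
        have hgt : ¬ ((kx + 1) * d ≤ size - 1 - b) := fun hc =>
          h2 ((PySem.Int.le_floordiv_iff_mul_le hp).mpr hc)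
        intro hc; omega
    · rw [if_neg hp] at hs
      by_cases hup : size ≤ b + d
      · rw [if_pos hup] at hs
        have hk := Option.some.inj hs
        intro hc; nlinarith [hc.2]
      · rw [if_neg hup] at hs
        have hk := Option.some.inj hs
        have hdpos : 0 < -d := by omega
        have h2 : ¬ (kx + 1 ≤ PySem.Int.floordiv b (-d)) := by omega
        have hgt : ¬ ((kx + 1) * (-d) ≤ b) := fun hc =>
          h2 ((PySem.Int.le_floordiv_iff_mul_le hdpos).mpr hc)
        intro hc; nlinarith [hc.1]

-- every axisSteps value is nonnegative
lemma axisSteps_nonneg (b d size kx : Int) (hs : axisSteps b d size = some kx) : 0 ≤ kx := by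
  unfold axisSteps at hs
  by_cases h0 : d = 0
  · rw [if_pos h0] at hs
    by_cases hin : 0 ≤ b ∧ b < size
    · rw [if_pos hin] at hs; exact absurd hs (by simp)
    · rw [if_neg hin] at hs
      have hk := Option.some.inj hs; omega
  · rw [if_neg h0] at hs
    by_cases hp : 0 < d
    · rw [if_pos hp] at hs
      by_cases hneg : b + d < 0
      · rw [if_pos hneg] at hs; have hk := Option.some.inj hs; omega
      · rw [if_neg hneg] at hs; have hk := Option.some.inj hs
        have := le_max_right (PySem.Int.floordiv (size - 1 - b) d) 0; omega
    · rw [if_neg hp] at hs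
      by_cases hup : size ≤ b + d
      · rw [if_pos hup] at hs; have hk := Option.some.inj hs; omega
      · rw [if_neg hup] at hs; have hk := Option.some.inj hs
        have := le_max_right (PySem.Int.floordiv b (-d)) 0; omega

-- axisSteps is none only for a zero delta (with b in range)
lemma axisSteps_none_d0 (b d size : Int) (hs : axisSteps b d size = none) : d = 0 := by
  unfold axisSteps at hs
  by_cases h0 : d = 0
  · exact h0
  · rw [if_neg h0] at hs
    by_cases hp : 0 < d
    · rw [if_pos hp] at hs
      by_cases hneg : b + d < 0
      · rw [if_pos hneg] at hs; exact absurd hs (by simp)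
      · rw [if_neg hneg] at hs; exact absurd hs (by simp)
    · rw [if_neg hp] at hs
      by_cases hup : size ≤ b + d
      · rw [if_pos hup] at hs; exact absurd hs (by simp)
      · rw [if_neg hup] at hs; exact absurd hs (by simp)

-- If the ray is in bounds at step 1 and at step K ≥ 1 with a nonzero step vector,
-- K is at most width + height (used only to size the fuel of the loop port).
lemma cbp_steps_bound (dx dy bx by_ width height K : Int) (hK : 1 ≤ K)
    (hne : ¬ (dx = 0 ∧ dy = 0))
    (h1 : 0 ≤ bx + dx ∧ 0 ≤ by_ + dy ∧ bx + dx < width ∧ by_ + dy < height)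
    (hk : 0 ≤ bx + K * dx ∧ 0 ≤ by_ + K * dy ∧ bx + K * dx < width ∧ by_ + K * dy < height) :
    K ≤ width + height := by
  obtain ⟨ha1, hb1, ha2, hb2⟩ := h1
  obtain ⟨hc1, hd1, hc2, hd2⟩ := hk
  have hd : dx ≠ 0 ∨ dy ≠ 0 := by tauto
  rcases hd with hdx | hdy
  · rcases lt_or_gt_of_ne hdx with hneg | hpos
    · have h : K - 1 ≤ (K - 1) * (-dx) := le_mul_of_one_le_right (by omega) (by omega)
      have e : (K - 1) * (-dx) = (bx + dx) - (bx + K * dx) := by ring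
      omega
    · have h : K - 1 ≤ (K - 1) * dx := le_mul_of_one_le_right (by omega) (by omega)
      have e : (K - 1) * dx = (bx + K * dx) - (bx + dx) := by ring
      omega
  · rcases lt_or_gt_of_ne hdy with hneg | hpos
    · have h : K - 1 ≤ (K - 1) * (-dy) := le_mul_of_one_le_right (by omega) (by omega)
      have e : (K - 1) * (-dy) = (by_ + dy) - (by_ + K * dy) := by ring
      omega
    · have h : K - 1 ≤ (K - 1) * dy := le_mul_of_one_le_right (by omega) (by omega)
      have e : (K - 1) * dy = (by_ + K * dy) - (by_ + dy) := by ring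
      omega

-- The loop equals the closed-form comprehension for any k that counts the in-bounds steps.
lemma cbp_loop_closed (dx dy bx by_ width height k : Int)
    (hne : ¬ (dx = 0 ∧ dy = 0)) (hk0 : 0 ≤ k)
    (hok : ∀ i : Int, 1 ≤ i → i ≤ k →
      0 ≤ bx + i * dx ∧ 0 ≤ by_ + i * dy ∧ bx + i * dx < width ∧ by_ + i * dy < height)
    (hbad : ¬ (0 ≤ bx + (k + 1) * dx ∧ 0 ≤ by_ + (k + 1) * dy ∧
      bx + (k + 1) * dx < width ∧ by_ + (k + 1) * dy < height)) :
    cbpLoop dx dy width height (width.toNat + height.toNat + 1) (bx + dx) (by_ + dy) [] =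
      (PySem.List.pyRange 1 (k + 1) 1).map (fun i => (bx + i * dx, by_ + i * dy)) := by
  have hok' : ∀ j : Nat, j < k.toNat →
      0 ≤ (bx + dx) + (j : Int) * dx ∧ 0 ≤ (by_ + dy) + (j : Int) * dy ∧
      (bx + dx) + (j : Int) * dx < width ∧ (by_ + dy) + (j : Int) * dy < height := by
    intro j hj
    have h := hok (1 + (j : Int)) (by omega) (by omega)
    have ex : bx + (1 + (j : Int)) * dx = (bx + dx) + (j : Int) * dx := by ring
    have ey : by_ + (1 + (j : Int)) * dy = (by_ + dy) + (j : Int) * dy := by ring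
    rw [ex, ey] at h
    exact h
  have hbad' : ¬ (0 ≤ (bx + dx) + (k.toNat : Int) * dx ∧ 0 ≤ (by_ + dy) + (k.toNat : Int) * dy ∧
      (bx + dx) + (k.toNat : Int) * dx < width ∧ (by_ + dy) + (k.toNat : Int) * dy < height) := by
    have hc : (k.toNat : Int) = k := Int.toNat_of_nonneg hk0
    intro hcon
    apply hbad
    have ex : bx + (k + 1) * dx = (bx + dx) + (k.toNat : Int) * dx := by rw [hc]; ring
    have ey : by_ + (k + 1) * dy = (by_ + dy) + (k.toNat : Int) * dy := by rw [hc]; ring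
    rw [ex, ey]
    exact hcon
  have hfuel : k.toNat < width.toNat + height.toNat + 1 := by
    by_cases hz : k.toNat = 0
    · omega
    · have hK1 : 1 ≤ k := by omega
      have h1 := hok 1 le_rfl hK1
      have hkk := hok k hK1 le_rfl
      have hb := cbp_steps_bound dx dy bx by_ width height k hK1 hne
        (by simpa using h1) hkk
      have hw : 0 < width := by
        have := h1.1; have := h1.2.2.1; omega
      have hh : 0 < height := by
        have := h1.2.1; have := h1.2.2.2; omega
      omega
  rw [cbpLoop_eq dx dy width height k.toNat _ (bx + dx) (by_ + dy) [] hfuel hok' hbad']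
  rw [PySem.List.pyRange_one]
  have hlen : (k + 1 - 1).toNat = k.toNat := by omega
  rw [hlen, List.map_map, List.nil_append]
  apply List.map_congr_left
  intro j _
  simp only [Function.comp_apply]
  refine Prod.ext ?_ ?_ <;> simp <;> ring

-- Bridge: for any step vector (dx, dy) ≠ (0, 0), A's loop equals B's closed-form comprehension.
lemma cbp_bridge (dx dy bx by_ width height : Int) (hne : ¬ (dx = 0 ∧ dy = 0)) :
    cbpLoop dx dy width height (width.toNat + height.toNat + 1) (bx + dx) (by_ + dy) [] =
      (PySem.List.pyRange 1
          (((PySem.List.min? (List.filterMap id [axisSteps bx dx width, axisSteps by_ dy height])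
              (fun x => x)).getD 0) + 1) 1).map
        (fun i => (bx + i * dx, by_ + i * dy)) := by
  rcases hx : axisSteps bx dx width with _ | kx <;>
    rcases hy : axisSteps by_ dy height with _ | ky
  · -- both none: dx = dy = 0, contradicting hne
    exact absurd ⟨axisSteps_none_d0 _ _ _ hx, axisSteps_none_d0 _ _ _ hy⟩ hne
  · -- x-axis unbounded, y-axis bounded by ky
    have hkey : (PySem.List.min? (List.filterMap id
        [(none : Option Int), some ky]) (fun x => x)).getD 0 = ky := by
      simp [PySem.List.min?_id_cons]
    rw [hkey]
    refine cbp_loop_closed dx dy bx by_ width height ky hne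
      (axisSteps_nonneg _ _ _ _ hy) ?_ ?_
    · intro i h1 hik
      have hxo := axisSteps_none bx dx width i hx
      have hyo := axisSteps_ok by_ dy height i ky h1 hy hik
      exact ⟨hxo.1, hyo.1, hxo.2, hyo.2⟩
    · intro hc
      exact axisSteps_bad by_ dy height ky hy ⟨hc.2.1, hc.2.2.2⟩
  · -- x-axis bounded by kx, y-axis unbounded
    have hkey : (PySem.List.min? (List.filterMap id
        [some kx, (none : Option Int)]) (fun x => x)).getD 0 = kx := by
      simp [PySem.List.min?_id_cons]
    rw [hkey]
    refine cbp_loop_closed dx dy bx by_ width height kx hne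
      (axisSteps_nonneg _ _ _ _ hx) ?_ ?_
    · intro i h1 hik
      have hxo := axisSteps_ok bx dx width i kx h1 hx hik
      have hyo := axisSteps_none by_ dy height i hy
      exact ⟨hxo.1, hyo.1, hxo.2, hyo.2⟩
    · intro hc
      exact axisSteps_bad bx dx width kx hx ⟨hc.1, hc.2.2.1⟩
  · -- both bounded: the minimum wins
    have hkey : (PySem.List.min? (List.filterMap id
        [some kx, some ky]) (fun x => x)).getD 0 = min kx ky := by
      simp [PySem.List.min?_id_cons]
    rw [hkey]
    refine cbp_loop_closed dx dy bx by_ width height (min kx ky) hne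
      (le_min (axisSteps_nonneg _ _ _ _ hx) (axisSteps_nonneg _ _ _ _ hy)) ?_ ?_
    · intro i h1 hik
      have hxo := axisSteps_ok bx dx width i kx h1 hx (le_trans hik (min_le_left _ _))
      have hyo := axisSteps_ok by_ dy height i ky h1 hy (le_trans hik (min_le_right _ _))
      exact ⟨hxo.1, hyo.1, hxo.2, hyo.2⟩
    · intro hc
      rcases le_total kx ky with hle | hle
      · have : min kx ky = kx := min_eq_left hle
        rw [this] at hc
        exact axisSteps_bad bx dx width kx hx ⟨hc.1, hc.2.2.1⟩
      · have : min kx ky = ky := min_eq_right hle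
        rw [this] at hc
        exact axisSteps_bad by_ dy height ky hy ⟨hc.2.1, hc.2.2.2⟩

-- ===== VERDICT (by name: the statement is the Claim_ definition above) =====
theorem calculate_blocked_positions_spec : Claim_equal_calculate_blocked_positions := by
  intro ox oy bx by_ width height hdom hpre
  unfold Spec_calculate_blocked_positions
  unfold Pre_calculate_blocked_positions at hpre
  unfold calculate_blocked_positions calculate_blocked_positions_alt
  dsimp only
  apply cbp_bridge
  -- the reduced step vector is nonzero because (bx, by) ≠ (ox, oy)
  rintro ⟨hu, hv⟩
  have hnz : ¬ (bx - ox = 0 ∧ by_ - oy = 0) := by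
    intro h; exact hpre ⟨by omega, by omega⟩
  have hdx : ((Int.gcd (bx - ox) (by_ - oy) : Int)) ∣ (bx - ox) := Int.gcd_dvd_left _ _
  have hdy : ((Int.gcd (bx - ox) (by_ - oy) : Int)) ∣ (by_ - oy) := Int.gcd_dvd_right _ _
  have ex := PySem.Int.floordiv_mul_add_mod (bx - ox) (Int.gcd (bx - ox) (by_ - oy) : Int)
  have ey := PySem.Int.floordiv_mul_add_mod (by_ - oy) (Int.gcd (bx - ox) (by_ - oy) : Int)
  rw [hu, (PySem.Int.mod_eq_zero_iff_dvd _ _).mpr hdx] at ex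
  rw [hv, (PySem.Int.mod_eq_zero_iff_dvd _ _).mpr hdy] at ey
  simp at ex ey
  exact hnz ⟨ex.symm, ey.symm⟩
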